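-- pv_equiv track=rewrite | github.com/0xStryK3R/Scaler-DSA-Revision | python/Day-15/HW_1.py | solve
-- ===== SOURCE A (Python) =====
-- def solve(A):
--     MOD = 10003
--     N = len(A)
--
--     cnt = 0
--
--     for i, ch in enumerate(A):
--         if ch.lower() in ('a', 'e', 'i', 'o', 'u'):
--             cnt += N - i
--
--     return cnt % MOD
-- ===== SOURCE B (Python) =====
-- def solve(A):
--     MOD = 10003
--     total = 0
--     vowel_count = 0
--     for ch in A:
--         if ch.lower() in ('a', 'e', 'i', 'o', 'u'):
--             vowel_count += 1
--         total += vowel_count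
--     return total % MOD
-- ===== Notes on version B (the rewrite author's own statement) =====
-- stated objective: alternative
-- what changed: Replaces A's per-start closed-form contribution (N-i per vowel) with a single left-to-right pass maintaining a running prefix vowel count that is added at every end position.
import Mathlib
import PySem

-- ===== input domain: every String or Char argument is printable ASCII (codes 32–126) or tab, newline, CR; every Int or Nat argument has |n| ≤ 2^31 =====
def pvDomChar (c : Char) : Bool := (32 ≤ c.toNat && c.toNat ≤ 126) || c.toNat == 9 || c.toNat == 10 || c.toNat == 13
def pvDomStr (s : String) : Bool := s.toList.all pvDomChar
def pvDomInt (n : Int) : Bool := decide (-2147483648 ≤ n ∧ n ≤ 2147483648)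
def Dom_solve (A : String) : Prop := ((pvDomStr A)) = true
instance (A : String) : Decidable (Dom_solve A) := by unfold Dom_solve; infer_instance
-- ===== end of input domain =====

-- B replaces A's per-start closed-form contribution (N-i per vowel) with one pass
-- keeping a running prefix vowel count added at every end position (alternative decomposition).

-- ch.lower() in ('a','e','i','o','u') for a single character (lower of a 1-char string = lowerChar)
def isVowelLower (c : Char) : Bool :=
  let lc := PySem.Chars.lowerChar c
  lc == 'a' || lc == 'e' || lc == 'i' || lc == 'o' || lc == 'u'

-- ===== PORT A =====
-- A's loop: for i, ch in enumerate(A): if vowel: cnt += N - i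
def solveLoopA (N : Int) : List Char → Int → Int → Int
  | [], _, cnt => cnt
  | c :: cs, i, cnt =>
      solveLoopA N cs (i + 1) (if isVowelLower c then cnt + (N - i) else cnt)

def solve (A : String) : Int :=
  -- MOD = 10003; N = len(A)
  PySem.Int.mod (solveLoopA (A.toList.length : Int) A.toList 0 0) 10003

-- ===== PORT B =====
-- B's loop: for ch in A: if vowel: vowel_count += 1; total += vowel_count
def solveLoopB : List Char → Int → Int → Int
  | [], _, total => total
  | c :: cs, vc, total =>
      let vc' := if isVowelLower c then vc + 1 else vc
      solveLoopB cs vc' (total + vc')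

def solve_alt (A : String) : Int :=
  PySem.Int.mod (solveLoopB A.toList 0 0) 10003

-- ===== PRECONDITION & SPEC =====
def Spec_solve (A : String) (out : Int) : Prop := out = solve_alt A
instance (A : String) (out : Int) : Decidable (Spec_solve A out) := by unfold Spec_solve; infer_instance

-- ===== CLAIM (what is proved, stated in full; the proofs are below) =====
def Claim_equal_solve : Prop := ∀ (A : String), Dom_solve A → Spec_solve A (solve A)

-- ===== LEMMAS AND PROOFS =====

-- S cs = Σ over vowels c in cs of (remaining length including c)
def vowelSum : List Char → Int
  | [] => 0
  | c :: cs => (if isVowelLower c then ((cs.length : Int) + 1) else 0) + vowelSum cs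

theorem solveLoopA_eq (cs : List Char) : ∀ (N i cnt : Int), N = i + cs.length →
    solveLoopA N cs i cnt = cnt + vowelSum cs := by
  induction cs with
  | nil => intro N i cnt h; simp [solveLoopA, vowelSum]
  | cons c cs ih =>
      intro N i cnt h
      have h' : N = (i + 1) + (cs.length : Int) := by
        simp at h; omega
      simp only [solveLoopA, vowelSum]
      rw [ih _ _ _ h']
      split_ifs with hv
      · have : N - i = (cs.length : Int) + 1 := by omega
        rw [this]; ring
      · ring

theorem solveLoopB_eq (cs : List Char) : ∀ (vc total : Int),
    solveLoopB cs vc total = total + vc * cs.length + vowelSum cs := by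
  induction cs with
  | nil => intro vc total; simp [solveLoopB, vowelSum]
  | cons c cs ih =>
      intro vc total
      simp only [solveLoopB, vowelSum]
      rw [ih]
      split_ifs with hv <;> simp [List.length_cons] <;> ring

-- ===== VERDICT (by name: the statement is the Claim_ definition above) =====
theorem solve_spec : Claim_equal_solve := by
  intro A _
  unfold Spec_solve solve solve_alt
  rw [solveLoopA_eq A.toList _ 0 0 (by simp), solveLoopB_eq]
  simp
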